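-- pv_equiv track=rewrite | github.com/marcrobards/local-agent-stack | src/shopping-agent/stages/refine.py | find_last_spec_and_results
-- ===== SOURCE A (Python) =====
-- RESULTS_MARKER = "<!-- shopping-agent:results -->"
--
-- def find_last_spec_and_results(messages: list[dict]) -> tuple[str, bool]:
--     """Scan conversation history to find the confirmed spec text and whether
--     results have been presented.
--
--     Returns (spec_text, has_results).
--     - spec_text: the assistant's confirmation summary before the user said "yes"
--     - has_results: True if the pipeline has already run (results marker found)
--     """
--     has_results = False
--     spec_text = ""
--
--     for i, msg in enumerate(messages):
--         if msg.get("role") == "assistant" and RESULTS_MARKER in msg.get("content", ""):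
--             has_results = True
--
--     if has_results:
--         # Walk backwards to find the original confirmation exchange:
--         # the pattern is assistant summary → user affirmative → assistant results
--         for i in range(len(messages) - 1, -1, -1):
--             msg = messages[i]
--             if msg.get("role") != "assistant":
--                 continue
--             if RESULTS_MARKER in msg.get("content", ""):
--                 # This is a results message. The spec is from the confirmation
--                 # exchange before it. Walk back to find user affirmative then
--                 # the assistant summary before that.
--                 for j in range(i - 1, -1, -1):
--                     if messages[j].get("role") == "assistant" and RESULTS_MARKER not in messages[j].get("content", ""):
--                         spec_text = messages[j]["content"]
--                         break
--                 break
--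
--     return spec_text, has_results
-- ===== SOURCE B (Python) =====
-- RESULTS_MARKER = "<!-- shopping-agent:results -->"
--
-- def find_last_spec_and_results(messages: list[dict]) -> tuple[str, bool]:
--     """Single backward pass: skip non-assistant messages; at the first
--     (i.e. last) assistant message carrying RESULTS_MARKER start searching;
--     the next marker-free assistant message is the spec."""
--     searching = False
--     for msg in reversed(messages):
--         if msg.get("role") != "assistant":
--             continue
--         if RESULTS_MARKER in msg.get("content", ""):
--             searching = True
--         elif searching:
--             return msg["content"], True
--     return "", searching
-- ===== Notes on version B (the rewrite author's own statement) =====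
-- stated objective: simpler
-- what changed: Replaces A's full forward marker scan plus two nested backward index loops (range(...,-1,-1) with messages[i]) by a single backward pass over reversed(messages) with a 'searching' flag that returns as soon as the spec message is found.
import Mathlib
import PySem

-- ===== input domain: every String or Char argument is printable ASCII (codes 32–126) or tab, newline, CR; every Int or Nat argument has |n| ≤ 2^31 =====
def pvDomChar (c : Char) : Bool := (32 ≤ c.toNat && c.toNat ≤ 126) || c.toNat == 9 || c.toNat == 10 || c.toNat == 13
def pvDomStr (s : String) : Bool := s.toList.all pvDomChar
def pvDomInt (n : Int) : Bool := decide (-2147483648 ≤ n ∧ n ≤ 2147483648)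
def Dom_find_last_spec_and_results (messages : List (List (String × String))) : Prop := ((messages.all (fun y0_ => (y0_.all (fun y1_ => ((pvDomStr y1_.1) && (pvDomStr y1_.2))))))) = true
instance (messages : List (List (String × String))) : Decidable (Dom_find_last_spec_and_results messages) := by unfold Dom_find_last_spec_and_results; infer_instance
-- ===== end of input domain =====

-- B replaces A's full forward scan plus nested backward index loops by ONE backward
-- pass over the messages with a flag (objective: simpler).

def pvMarker : String := "<!-- shopping-agent:results -->"

-- shared accessors, each one Python expression:
-- msg.get("role") == "assistant"
def pvRoleOk (msg : List (String × String)) : Bool :=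
  (PySem.Dict.ofList msg).get? "role" == some "assistant"
-- RESULTS_MARKER in msg.get("content", "")
def pvHasMarker (msg : List (String × String)) : Bool :=
  PySem.Str.isIn pvMarker ((PySem.Dict.ofList msg).getD "content" "")
-- msg["content"]  (missing key = KeyError, excluded by Pre_; the ports return "" there)
def pvContent (msg : List (String × String)) : String :=
  ((PySem.Dict.ofList msg).get? "content").getD ""

-- ===== PORT A =====
-- inner loop: for j in range(i-1, -1, -1): …
def pvInnerA (messages : List (List (String × String))) : List Int → String
  | [] => ""
  | j :: rest =>
    let msg := (PySem.List.pyGet? messages j).getD []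
    if pvRoleOk msg && !pvHasMarker msg then pvContent msg
    else pvInnerA messages rest

-- outer loop: for i in range(len(messages)-1, -1, -1): …
def pvOuterA (messages : List (List (String × String))) : List Int → String
  | [] => ""
  | i :: rest =>
    let msg := (PySem.List.pyGet? messages i).getD []
    if !pvRoleOk msg then pvOuterA messages rest
    else if pvHasMarker msg then pvInnerA messages (PySem.List.pyRange (i - 1) (-1) (-1))
    else pvOuterA messages rest

def find_last_spec_and_results (messages : List (List (String × String))) : String × Bool :=
  let has_results := messages.foldl
    (fun acc msg => if pvRoleOk msg && pvHasMarker msg then true else acc) false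
  let spec_text :=
    if has_results then
      pvOuterA messages (PySem.List.pyRange ((messages.length : Int) - 1) (-1) (-1))
    else ""
  (spec_text, has_results)

-- ===== PORT B =====
def pvGoB : List (List (String × String)) → Bool → String × Bool
  | [], searching => ("", searching)
  | msg :: rest, searching =>
    if !pvRoleOk msg then pvGoB rest searching
    else if pvHasMarker msg then pvGoB rest true
    else if searching then (pvContent msg, true)
    else pvGoB rest searching

def find_last_spec_and_results_alt (messages : List (List (String × String))) : String × Bool :=
  pvGoB messages.reverse false

-- ===== PRECONDITION & SPEC =====
-- the message whose "content" A reads by direct indexing: the first marker-free assistant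
-- message before the last assistant message carrying the results marker
def pvSpecCandidate? (messages : List (List (String × String))) : Option (List (String × String)) :=
  match messages.reverse.dropWhile (fun m => !(pvRoleOk m && pvHasMarker m)) with
  | [] => none
  | _ :: tl => tl.find? (fun m => pvRoleOk m && !pvHasMarker m)

-- Pre_ excludes exactly the inputs where A raises KeyError: the spec message it selects
-- (first marker-free assistant message before the last results-marker message) lacks a
-- "content" key, so messages[j]["content"] raises.
def Pre_find_last_spec_and_results (messages : List (List (String × String))) : Prop :=
  ((pvSpecCandidate? messages).all (fun m => (PySem.Dict.ofList m).contains "content")) = true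
instance (messages : List (List (String × String))) : Decidable (Pre_find_last_spec_and_results messages) := by
  unfold Pre_find_last_spec_and_results; infer_instance

def pvWitness_find_last_spec_and_results : (List (List (String × String))) :=
  [[("role", "assistant"), ("content", "Spec: red shoes under $50")],
   [("role", "user"), ("content", "yes")],
   [("role", "assistant"), ("content", "<!-- shopping-agent:results --> here they are")]]

def Spec_find_last_spec_and_results (messages : List (List (String × String))) (out : String × Bool) : Prop := out = find_last_spec_and_results_alt messages
instance (messages : List (List (String × String))) (out : String × Bool) : Decidable (Spec_find_last_spec_and_results messages out) := by unfold Spec_find_last_spec_and_results; infer_instance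

-- ===== CLAIM (what is proved, stated in full; the proofs are below) =====
def Claim_equal_find_last_spec_and_results : Prop := ∀ (messages : List (List (String × String))), Dom_find_last_spec_and_results messages → Pre_find_last_spec_and_results messages → Spec_find_last_spec_and_results messages (find_last_spec_and_results messages)

-- ===== LEMMAS AND PROOFS =====

-- proof-side views of A's two backward index loops as traversals of the reversed list
def pvInnerL : List (List (String × String)) → String
  | [] => ""
  | m :: rest => if pvRoleOk m && !pvHasMarker m then pvContent m else pvInnerL rest

def pvOuterL : List (List (String × String)) → String
  | [] => ""
  | m :: rest => if pvRoleOk m && pvHasMarker m then pvInnerL rest else pvOuterL rest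

theorem pv_foldl_any {α : Type} (p : α → Bool) (l : List α) (b : Bool) :
    l.foldl (fun acc x => if p x then true else acc) b = (b || l.any p) := by
  induction l generalizing b with
  | nil => simp
  | cons a t ih =>
      rw [List.foldl_cons, ih, List.any_cons]
      cases h : p a <;> cases b <;> simp [h]

theorem pvInnerA_eq (messages : List (List (String × String))) (k : Nat) (hk : k ≤ messages.length) :
    pvInnerA messages (PySem.List.pyRange ((k : Int) - 1) (-1) (-1)) =
      pvInnerL ((messages.take k).reverse) := by
  induction k with
  | zero =>
      rw [PySem.List.pyRange_neg_one_eq_nil (by omega)]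
      simp [pvInnerA, pvInnerL]
  | succ k ih =>
      have hlt : k < messages.length := by omega
      have hc : ((k + 1 : Nat) : Int) - 1 = (k : Int) := by push_cast; omega
      have hget : (PySem.List.pyGet? messages ((k : Nat) : Int)).getD [] = messages[k] := by
        simp [hlt]
      have hrev : (messages.take (k + 1)).reverse = messages[k] :: (messages.take k).reverse := by
        rw [List.take_add_one]
        simp [List.getElem?_eq_getElem hlt]
      rw [hc, PySem.List.pyRange_neg_one_cons (by omega), hrev]
      simp only [pvInnerA, pvInnerL, hget]
      rw [ih (by omega)]

theorem pvOuterA_eq (messages : List (List (String × String))) (k : Nat) (hk : k ≤ messages.length) :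
    pvOuterA messages (PySem.List.pyRange ((k : Int) - 1) (-1) (-1)) =
      pvOuterL ((messages.take k).reverse) := by
  induction k with
  | zero =>
      rw [PySem.List.pyRange_neg_one_eq_nil (by omega)]
      simp [pvOuterA, pvOuterL]
  | succ k ih =>
      have hlt : k < messages.length := by omega
      have hc : ((k + 1 : Nat) : Int) - 1 = (k : Int) := by push_cast; omega
      have hget : (PySem.List.pyGet? messages ((k : Nat) : Int)).getD [] = messages[k] := by
        simp [hlt]
      have hrev : (messages.take (k + 1)).reverse = messages[k] :: (messages.take k).reverse := by
        rw [List.take_add_one]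
        simp [List.getElem?_eq_getElem hlt]
      rw [hc, PySem.List.pyRange_neg_one_cons (by omega), hrev]
      simp only [pvOuterA, pvOuterL, hget]
      cases h1 : pvRoleOk messages[k] <;> cases h2 : pvHasMarker messages[k] <;>
        simp [h1, h2, ih (by omega), pvInnerA_eq messages k (by omega)]

theorem pvGoB_true (r : List (List (String × String))) : pvGoB r true = (pvInnerL r, true) := by
  induction r with
  | nil => simp [pvGoB, pvInnerL]
  | cons m t ih =>
      simp only [pvGoB, pvInnerL]
      cases h1 : pvRoleOk m <;> cases h2 : pvHasMarker m <;> simp [h1, h2, ih]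

theorem pvGoB_false (r : List (List (String × String))) :
    pvGoB r false =
      (if r.any (fun m => pvRoleOk m && pvHasMarker m) then pvOuterL r else "",
        r.any (fun m => pvRoleOk m && pvHasMarker m)) := by
  induction r with
  | nil => simp [pvGoB]
  | cons m t ih =>
      simp only [pvGoB, pvOuterL, List.any_cons]
      cases h1 : pvRoleOk m <;> cases h2 : pvHasMarker m <;> simp [h1, h2, ih, pvGoB_true]

theorem pv_ports_agree (messages : List (List (String × String))) :
    find_last_spec_and_results messages = find_last_spec_and_results_alt messages := by
  simp only [find_last_spec_and_results, find_last_spec_and_results_alt]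
  rw [pvGoB_false, List.any_reverse, pv_foldl_any]
  have houter := pvOuterA_eq messages messages.length (le_refl _)
  rw [List.take_length] at houter
  rw [Bool.false_or, houter]

-- ===== VERDICT (by name: the statement is the Claim_ definition above) =====
theorem find_last_spec_and_results_spec : Claim_equal_find_last_spec_and_results := by
  intro messages _ _
  unfold Spec_find_last_spec_and_results
  exact pv_ports_agree messages
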